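-- pv_equiv track=rewrite | github.com/JohnAndrewBalbarosa/MCP | mcp_apps/orchestrator/app/context_compactor.py | extract_function_headers
-- ===== SOURCE A (Python) =====
-- from typing import Any, Dict, List
--
-- def extract_function_headers(source_text: str, language_hint: str = "") -> List[Dict[str, str]]:
--     """Extract compact function headers from source text or precomputed summaries."""
--     del language_hint
--     lines = [line.strip() for line in source_text.splitlines() if line.strip()]
--     headers: List[Dict[str, str]] = []
--     current: Dict[str, str] | None = None
--
--     for line in lines:
--         lowered = line.lower()
--         if lowered.startswith("function:"):
--             if current:
--                 headers.append(current)
--             current = {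
--                 "name": line.split(":", 1)[1].strip(),
--                 "description": "",
--                 "input": "",
--                 "output": "",
--             }
--             continue
--         if current is None:
--             continue
--         if lowered.startswith("description:"):
--             current["description"] = line.split(":", 1)[1].strip()
--         elif lowered.startswith("input:"):
--             current["input"] = line.split(":", 1)[1].strip()
--         elif lowered.startswith("output:"):
--             current["output"] = line.split(":", 1)[1].strip()
--
--     if current:
--         headers.append(current)
--     return headers
-- ===== SOURCE B (Python) =====
-- def extract_function_headers(source_text: str, language_hint: str = ""):
--     """Two-phase: split the stripped non-empty lines into blocks at 'function:'
--     markers (dropping leading non-marker lines), then map each block to its dict."""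
--     lines = [line.strip() for line in source_text.splitlines() if line.strip()]
--
--     def is_marker(ln):
--         return ln.lower().startswith("function:")
--
--     # phase 1: group into blocks, ignoring lines before the first marker
--     def blocks(rest):
--         out = []
--         while rest:
--             head, rest = rest[0], rest[1:]
--             if not is_marker(head):
--                 continue
--             body = []
--             while rest and not is_marker(rest[0]):
--                 body.append(rest[0])
--                 rest = rest[1:]
--             out.append([head] + body)
--         return out
--
--     # phase 2: one dict per block
--     def build(block):
--         d = {
--             "name": block[0].split(":", 1)[1].strip(),
--             "description": "",
--             "input": "",
--             "output": "",
--         }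
--         for ln in block[1:]:
--             low = ln.lower()
--             if low.startswith("description:"):
--                 d["description"] = ln.split(":", 1)[1].strip()
--             elif low.startswith("input:"):
--                 d["input"] = ln.split(":", 1)[1].strip()
--             elif low.startswith("output:"):
--                 d["output"] = ln.split(":", 1)[1].strip()
--         return d
--
--     return [build(b) for b in blocks(lines)]
-- ===== Notes on version B (the rewrite author's own statement) =====
-- stated objective: alternative
-- what changed: Replaces A's single streaming loop with an optional accumulator dict by a two-phase decomposition: first split the stripped non-empty lines into marker-headed blocks (dropping leading non-marker lines), then map each block independently to its header dict.
import Mathlib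
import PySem

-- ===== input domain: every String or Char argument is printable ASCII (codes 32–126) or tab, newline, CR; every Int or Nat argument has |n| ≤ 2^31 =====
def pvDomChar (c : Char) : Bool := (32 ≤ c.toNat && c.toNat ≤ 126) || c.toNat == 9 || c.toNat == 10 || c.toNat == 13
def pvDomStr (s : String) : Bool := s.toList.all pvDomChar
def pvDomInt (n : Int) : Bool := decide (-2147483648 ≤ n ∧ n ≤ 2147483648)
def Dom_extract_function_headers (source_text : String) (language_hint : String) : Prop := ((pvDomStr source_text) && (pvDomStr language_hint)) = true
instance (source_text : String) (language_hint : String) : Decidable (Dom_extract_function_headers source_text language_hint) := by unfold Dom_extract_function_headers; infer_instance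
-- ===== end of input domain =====

-- B replaces A's streaming loop (headers list + optional 'current' dict) by a two-phase
-- decomposition: split the lines into marker-headed blocks, then map each block to its dict
-- independently (objective: alternative decomposition, same O(n) cost).

-- ===== PORT A =====
-- line.split(":", 1)[1].strip() — exact whenever the line contains ':' (here always guarded by
-- a startswith "…:" test, so the [1] index never raises in Python; getD is unreached otherwise)
def pvAfterColon (line : String) : String :=
  PySem.Str.strip (((PySem.Str.splitMax? line ":" 1).getD []).getD 1 "")

-- the literal dict {"name": …, "description": "", "input": "", "output": ""}
def pvInit (line : String) : PySem.Dict String String :=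
  PySem.Dict.ofList [("name", pvAfterColon line), ("description", ""), ("input", ""), ("output", "")]

-- 'if current: headers.append(current)' (Python dict truthiness: append iff non-empty)
def pvPush (st : List (List (String × String)) × Option (PySem.Dict String String)) :
    List (List (String × String)) :=
  match st.2 with
  | some c => if c.items = [] then st.1 else st.1 ++ [c.items]
  | none => st.1

-- the body of A's for-loop, one line at a time
def pvStepA (st : List (List (String × String)) × Option (PySem.Dict String String))
    (line : String) : List (List (String × String)) × Option (PySem.Dict String String) :=
  let lowered := PySem.Str.lower line
  if PySem.Str.startswith lowered "function:" then
    (pvPush st, some (pvInit line))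
  else
    match st.2 with
    | none => st
    | some c =>
      if PySem.Str.startswith lowered "description:" then
        (st.1, some (c.insert "description" (pvAfterColon line)))
      else if PySem.Str.startswith lowered "input:" then
        (st.1, some (c.insert "input" (pvAfterColon line)))
      else if PySem.Str.startswith lowered "output:" then
        (st.1, some (c.insert "output" (pvAfterColon line)))
      else st

def extract_function_headers (source_text : String) (language_hint : String) :
    List (List (String × String)) :=
  let lines := ((PySem.Str.splitlines source_text).map PySem.Str.strip).filter (fun l => l ≠ "")
  pvPush (lines.foldl pvStepA ([], none))

-- ===== PORT B =====
def pvIsMarker (ln : String) : Bool :=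
  PySem.Str.startswith (PySem.Str.lower ln) "function:"

-- phase 1: peel lines into marker-headed blocks, skipping non-marker lines between blocks
def pvBlocks : List String → List (List String)
  | [] => []
  | ln :: rest =>
    if pvIsMarker ln then
      (ln :: rest.takeWhile (fun l => !pvIsMarker l)) ::
        pvBlocks (rest.dropWhile (fun l => !pvIsMarker l))
    else pvBlocks rest
  termination_by lines => lines.length
  decreasing_by
  · exact Nat.lt_succ_of_le (List.length_dropWhile_le _ _)
  · exact Nat.lt_succ_self _

-- the body of B's inner for-loop over a block's non-header lines
def pvApplyKey (d : PySem.Dict String String) (ln : String) : PySem.Dict String String :=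
  let low := PySem.Str.lower ln
  if PySem.Str.startswith low "description:" then d.insert "description" (pvAfterColon ln)
  else if PySem.Str.startswith low "input:" then d.insert "input" (pvAfterColon ln)
  else if PySem.Str.startswith low "output:" then d.insert "output" (pvAfterColon ln)
  else d

-- phase 2: one dict per block (block[0] is the marker line; blocks are never empty)
def pvBuild (block : List String) : List (String × String) :=
  ((block.drop 1).foldl pvApplyKey (pvInit (block.headD ""))).items

def extract_function_headers_alt (source_text : String) (language_hint : String) :
    List (List (String × String)) :=
  let lines := ((PySem.Str.splitlines source_text).map PySem.Str.strip).filter (fun l => l ≠ "")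
  (pvBlocks lines).map pvBuild

-- ===== PRECONDITION & SPEC =====
def Spec_extract_function_headers (source_text : String) (language_hint : String) (out : List (List (String × String))) : Prop := out = extract_function_headers_alt source_text language_hint
instance (source_text : String) (language_hint : String) (out : List (List (String × String))) : Decidable (Spec_extract_function_headers source_text language_hint out) := by unfold Spec_extract_function_headers; infer_instance

-- ===== CLAIM (what is proved, stated in full; the proofs are below) =====
def Claim_equal_extract_function_headers : Prop := ∀ (source_text : String) (language_hint : String), Dom_extract_function_headers source_text language_hint → Spec_extract_function_headers source_text language_hint (extract_function_headers source_text language_hint)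

-- ===== LEMMAS AND PROOFS =====

theorem pv_items_insert_ne_nil (d : PySem.Dict String String) (k v : String) :
    (d.insert k v).items ≠ [] := by
  rw [PySem.Dict.items_insert]
  by_cases h : d.contains k = true
  · simp only [h, if_true]
    intro hmap
    have : d.items = [] := by simpa using congrArg List.length hmap
    have hk : k ∈ d.keys := (PySem.Dict.contains_iff_mem_keys _ _).mp h
    simp [PySem.Dict.keys, this] at hk
  · simp [h]

theorem pv_applyKey_items_ne_nil (d : PySem.Dict String String) (ln : String)
    (h : d.items ≠ []) : (pvApplyKey d ln).items ≠ [] := by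
  rw [pvApplyKey]
  split_ifs <;> first | exact pv_items_insert_ne_nil _ _ _ | exact h

theorem pv_init_items_ne_nil (line : String) : (pvInit line).items ≠ [] := by
  have h : (pvInit line).items =
      [("name", pvAfterColon line), ("description", ""), ("input", ""), ("output", "")] := by
    simp [pvInit, PySem.Dict.ofList, PySem.Dict.update, PySem.Dict.insert, PySem.Dict.empty,
      PySem.Dict.contains, List.foldl]
  simp [h]

theorem pv_stepA_marker (st : List (List (String × String)) × Option (PySem.Dict String String))
    (ln : String) (h : pvIsMarker ln = true) :
    pvStepA st ln = (pvPush st, some (pvInit ln)) := by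
  unfold pvStepA
  simp [pvIsMarker] at h
  simp [h]

theorem pv_stepA_none (hs : List (List (String × String))) (ln : String)
    (h : pvIsMarker ln = false) : pvStepA (hs, none) ln = (hs, none) := by
  unfold pvStepA
  simp [pvIsMarker] at h
  simp [h]

theorem pv_stepA_some (hs : List (List (String × String))) (c : PySem.Dict String String)
    (ln : String) (h : pvIsMarker ln = false) :
    pvStepA (hs, some c) ln = (hs, some (pvApplyKey c ln)) := by
  have h' : PySem.Str.startswith (PySem.Str.lower ln) "function:" = false := by
    simpa [pvIsMarker] using h
  unfold pvStepA pvApplyKey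
  simp only [h', Bool.false_eq_true, if_false]
  split_ifs <;> rfl

theorem pv_foldl_some (lines : List String) : ∀ (hs : List (List (String × String)))
    (c : PySem.Dict String String), c.items ≠ [] →
    pvPush (lines.foldl pvStepA (hs, some c)) =
      hs ++ ((lines.takeWhile (fun l => !pvIsMarker l)).foldl pvApplyKey c).items ::
        (pvBlocks (lines.dropWhile (fun l => !pvIsMarker l))).map pvBuild := by
  induction lines with
  | nil => intro hs c hc; simp [pvPush, pvBlocks, hc]
  | cons ln rest ih =>
    intro hs c hc
    by_cases h : pvIsMarker ln = true
    · rw [List.foldl_cons, pv_stepA_marker _ _ h]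
      have hpush : pvPush (hs, some c) = hs ++ [c.items] := by simp [pvPush, hc]
      rw [hpush, ih (hs ++ [c.items]) (pvInit ln) (pv_init_items_ne_nil ln)]
      have htw : (ln :: rest).takeWhile (fun l => !pvIsMarker l) = [] := by
        simp [List.takeWhile, h]
      have hdw : (ln :: rest).dropWhile (fun l => !pvIsMarker l) = ln :: rest := by
        simp [List.dropWhile, h]
      rw [htw, hdw]
      rw [pvBlocks]
      simp only [h, if_true, List.map_cons, List.foldl_nil]
      have hb : pvBuild (ln :: rest.takeWhile (fun l => !pvIsMarker l)) =
          ((rest.takeWhile (fun l => !pvIsMarker l)).foldl pvApplyKey (pvInit ln)).items := by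
        simp [pvBuild]
      rw [hb, List.append_assoc]
      rfl
    · have h' : pvIsMarker ln = false := by simpa using h
      rw [List.foldl_cons, pv_stepA_some _ _ _ h',
        ih hs (pvApplyKey c ln) (pv_applyKey_items_ne_nil c ln hc)]
      have htw : (ln :: rest).takeWhile (fun l => !pvIsMarker l) =
          ln :: rest.takeWhile (fun l => !pvIsMarker l) := by
        simp [List.takeWhile, h']
      have hdw : (ln :: rest).dropWhile (fun l => !pvIsMarker l) =
          rest.dropWhile (fun l => !pvIsMarker l) := by
        simp [List.dropWhile, h']
      rw [htw, hdw, List.foldl_cons]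

theorem pv_foldl_none (lines : List String) : ∀ (hs : List (List (String × String))),
    pvPush (lines.foldl pvStepA (hs, none)) = hs ++ (pvBlocks lines).map pvBuild := by
  induction lines with
  | nil => intro hs; simp [pvPush, pvBlocks]
  | cons ln rest ih =>
    intro hs
    by_cases h : pvIsMarker ln = true
    · rw [List.foldl_cons, pv_stepA_marker _ _ h]
      have hpush : pvPush ((hs : List (List (String × String))), (none : Option (PySem.Dict String String))) = hs := rfl
      rw [hpush, pv_foldl_some rest hs (pvInit ln) (pv_init_items_ne_nil ln)]
      rw [pvBlocks]
      simp only [h, if_true, List.map_cons]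
      have hb : pvBuild (ln :: rest.takeWhile (fun l => !pvIsMarker l)) =
          ((rest.takeWhile (fun l => !pvIsMarker l)).foldl pvApplyKey (pvInit ln)).items := by
        simp [pvBuild]
      rw [hb]
    · have h' : pvIsMarker ln = false := by simpa using h
      rw [List.foldl_cons, pv_stepA_none _ _ h', ih hs]
      rw [pvBlocks]
      simp [h']

-- ===== VERDICT (by name: the statement is the Claim_ definition above) =====
theorem extract_function_headers_spec : Claim_equal_extract_function_headers := by
  intro source_text language_hint _
  unfold Spec_extract_function_headers extract_function_headers extract_function_headers_alt
  exact pv_foldl_none _ []
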